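-- pv_equiv track=rewrite | github.com/alainrk/pythonChallenges | ctci/dynprog/wines.py | sellWinesTopDown
-- ===== SOURCE A (Python) =====
-- def sellWinesTopDown(wines):
--   dp = [[float('-inf') for _ in range(len(wines))] for _ in range(len(wines))]
--   dp[0][len(wines) - 1] = 0 # starting point
--
--   for l in range(len(dp)):
--     for r in range(len(dp) - 1, l, -1):
--       year = l + (len(wines) - r)
--       dp[l + 1][r] = max(dp[l][r] + year * wines[l], dp[l + 1][r])
--       dp[l][r - 1] = max(dp[l][r] + year * wines[r], dp[l][r - 1])
--
--   # search solution
--   maxSell = 0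
--   for i in range(len(wines)):
--     maxSell = max(maxSell, dp[i][i] + len(wines) * wines[i])
--
--   return maxSell
-- ===== SOURCE B (Python) =====
-- def sellWinesTopDown(wines):
--     # Top-down memoized recursion over the interval [l, r] of wines still unsold:
--     # rec(l, r) = best profit obtainable from the remaining interval, where the
--     # next sale happens in year n - (r - l).
--     n = len(wines)
--     memo = {}
--
--     def rec(l, r):
--         if l > r:
--             return 0
--         key = (l, r)
--         if key in memo:
--             return memo[key]
--         year = n - (r - l)
--         best = max(year * wines[l] + rec(l + 1, r),
--                    year * wines[r] + rec(l, r - 1))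
--         memo[key] = best
--         return best
--
--     return max(0, rec(0, n - 1))
-- ===== Notes on version B (the rewrite author's own statement) =====
-- stated objective: alternative
-- what changed: Replaces the iterative forward 'push' DP over an n-by-n table (seeded at state (0,n-1) and propagating accumulated profit toward the diagonal, then scanning the diagonal) by a top-down memoized recursion rec(l,r) over the interval of unsold wines that computes the optimal future profit directly, returning max(0, rec(0,n-1)).
import Mathlib
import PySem

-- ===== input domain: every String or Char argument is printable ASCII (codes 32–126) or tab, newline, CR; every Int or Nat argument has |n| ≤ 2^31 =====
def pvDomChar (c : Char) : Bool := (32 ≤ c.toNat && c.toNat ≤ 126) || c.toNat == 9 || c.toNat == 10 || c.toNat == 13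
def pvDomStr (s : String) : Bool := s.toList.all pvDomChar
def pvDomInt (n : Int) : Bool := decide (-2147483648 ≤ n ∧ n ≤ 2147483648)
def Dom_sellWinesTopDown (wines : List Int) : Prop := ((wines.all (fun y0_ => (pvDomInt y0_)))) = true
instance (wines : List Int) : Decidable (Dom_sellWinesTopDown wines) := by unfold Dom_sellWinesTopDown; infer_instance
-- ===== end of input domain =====

-- B re-implements the forward table DP as a top-down memoized recursion over the interval
-- of unsold wines (objective: alternative decomposition, same O(n^2) cost).

-- ===== PORT A =====
-- Python's float('-inf') table entries are modelled as `none`: -inf only ever acts as the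
-- identity of `max` and is never returned (the final loop keeps an int whenever the entry is -inf).
def omax : Option Int → Option Int → Option Int
  | none, b => b
  | a, none => a
  | some x, some y => some (max x y)

def oadd (a : Option Int) (x : Int) : Option Int := a.map (· + x)

-- dp[i][j] read; negative/out-of-range indices follow Python via pyGetD (all uses are in range).
def mget (dp : List (List (Option Int))) (i j : Int) : Option Int :=
  PySem.List.pyGetD (PySem.List.pyGetD dp i []) j none

-- dp[i][j] = v
def mset (dp : List (List (Option Int))) (i j : Int) (v : Option Int) : List (List (Option Int)) :=
  PySem.List.pySetD dp i (PySem.List.pySetD (PySem.List.pyGetD dp i []) j v)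

-- the body of the inner `for r in range(len(dp)-1, l, -1)` loop
def stepA (wines : List Int) (l : Int) (dp : List (List (Option Int))) (r : Int) : List (List (Option Int)) :=
  let n : Int := wines.length
  let year := l + (n - r)
  let dp1 := mset dp (l+1) r (omax (oadd (mget dp l r) (year * PySem.List.pyGetD wines l 0)) (mget dp (l+1) r))
  mset dp1 l (r-1) (omax (oadd (mget dp1 l r) (year * PySem.List.pyGetD wines r 0)) (mget dp1 l (r-1)))

def sellWinesTopDown (wines : List Int) : Int :=
  let n : Int := wines.length
  let dp0 : List (List (Option Int)) := List.replicate wines.length (List.replicate wines.length none)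
  let dpInit := mset dp0 0 (n - 1) (some 0)  -- dp[0][len(wines)-1] = 0
  let dp2 := (PySem.List.pyRange 0 n 1).foldl
    (fun dp l => (PySem.List.pyRange (n - 1) l (-1)).foldl (stepA wines l) dp) dpInit
  -- maxSell loop; a `none` ( = -inf) entry leaves maxSell unchanged, exactly as max(maxSell, -inf+int)
  (PySem.List.pyRange 0 n 1).foldl
    (fun maxSell i =>
      match mget dp2 i i with
      | some v => max maxSell (v + n * PySem.List.pyGetD wines i 0)
      | none => maxSell) 0

-- ===== PORT B =====
-- rec(l, r) of Source B: optimal future profit from unsold interval [l, r] (memoization in Source B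
-- is pure caching and is ported as plain recursion). All wines accesses are in range.
def altRec (wines : List Int) (l r : Int) : Int :=
  if l > r then 0
  else
    let year := (wines.length : Int) - (r - l)
    max (year * PySem.List.pyGetD wines l 0 + altRec wines (l + 1) r)
        (year * PySem.List.pyGetD wines r 0 + altRec wines l (r - 1))
termination_by (r + 1 - l).toNat
decreasing_by all_goals (simp at *; omega)

def sellWinesTopDown_alt (wines : List Int) : Int :=
  max 0 (altRec wines 0 ((wines.length : Int) - 1))

-- ===== PRECONDITION & SPEC =====
-- Pre_ excludes only the empty list, on which A raises IndexError (dp[0] of an empty table).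
def Pre_sellWinesTopDown (wines : List Int) : Prop := wines ≠ []
instance (wines : List Int) : Decidable (Pre_sellWinesTopDown wines) := by unfold Pre_sellWinesTopDown; infer_instance
def pvWitness_sellWinesTopDown : List Int := [3, 1, 2]

def Spec_sellWinesTopDown (wines : List Int) (out : Int) : Prop := out = sellWinesTopDown_alt wines
instance (wines : List Int) (out : Int) : Decidable (Spec_sellWinesTopDown wines out) := by unfold Spec_sellWinesTopDown; infer_instance

-- ===== CLAIM (what is proved, stated in full; the proofs are below) =====
def Claim_equal_sellWinesTopDown : Prop := ∀ (wines : List Int), Dom_sellWinesTopDown wines → Pre_sellWinesTopDown wines → Spec_sellWinesTopDown wines (sellWinesTopDown wines)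


-- ===== LEMMAS AND PROOFS =====

-- wines[a] for a proof-side Nat index
def wAt (W : List Int) (a : Nat) : Int := W.getD a 0

-- the year of the sale performed FROM state (l, r) (l wines sold on the left, n-1-r on the right)
def yr (n l r : Nat) : Int := (l : Int) + ((n : Int) - (r : Int))

-- G W a b = best accumulated profit upon reaching state (a, b) (characterises A's dp table)
def G (W : List Int) (a b : Nat) : Int :=
  if _hl : a = 0 then
    if b + 1 = W.length then 0
    else if _hr : b + 1 < W.length then G W 0 (b+1) + yr W.length 0 (b+1) * wAt W (b+1)
    else 0
  else
    if _hr : b + 1 < W.length then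
      max (G W (a-1) b + yr W.length (a-1) b * wAt W (a-1))
          (G W a (b+1) + yr W.length a (b+1) * wAt W (b+1))
    else G W (a-1) b + yr W.length (a-1) b * wAt W (a-1)
termination_by a + (W.length - b)
decreasing_by all_goals omega

-- model of dp cell (a,b) when all loop steps (l',r') with l' < l, or l' = l and r' >= r, are done
def M (W : List Int) (l r a b : Nat) : Option Int :=
  omax (omax
    (if a = 0 ∧ b + 1 = W.length then some 0 else none)
    (if 1 ≤ a ∧ a ≤ b ∧ b + 1 ≤ W.length ∧ (a - 1 < l ∨ (a - 1 = l ∧ r ≤ b))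
     then some (G W (a-1) b + yr W.length (a-1) b * wAt W (a-1)) else none))
    (if a ≤ b ∧ b + 2 ≤ W.length ∧ (a < l ∨ (a = l ∧ r ≤ b + 1))
     then some (G W a (b+1) + yr W.length a (b+1) * wAt W (b+1)) else none)

def Shape (n : Nat) (dp : List (List (Option Int))) : Prop :=
  dp.length = n ∧ ∀ row ∈ dp, row.length = n

def DPInv (W : List Int) (l r : Nat) (dp : List (List (Option Int))) : Prop :=
  ∀ a b : Nat, a ≤ b → b < W.length → mget dp (a : Int) (b : Int) = M W l r a b

lemma omax_none_right (a : Option Int) : omax a none = a := by cases a <;> rfl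

lemma omax_comm (a b : Option Int) : omax a b = omax b a := by
  cases a <;> cases b <;> simp [omax, max_comm]

lemma mget_cast (dp : List (List (Option Int))) (a b : Nat) :
    mget dp (a : Int) (b : Int) = (dp.getD a []).getD b none := by
  simp [mget]

lemma mset_cast (dp : List (List (Option Int))) (a b : Nat) (v : Option Int) :
    mset dp (a : Int) (b : Int) v = dp.set a ((dp.getD a []).set b v) := by
  simp [mset]

lemma getD_set_nat {α : Type} (xs : List α) (i j : Nat) (v : α) (d : α) :
    (xs.set i v).getD j d = if j = i ∧ i < xs.length then v else xs.getD j d := by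
  simp only [List.getD_eq_getElem?_getD, List.getElem?_set]
  split_ifs with h1 h2 h3 h4 <;> simp_all <;> omega

lemma shape_mset {n : Nat} {dp : List (List (Option Int))} (hS : Shape n dp)
    (a b : Nat) (ha : a < n) (v : Option Int) :
    Shape n (mset dp (a : Int) (b : Int) v) := by
  obtain ⟨hlen, hrow⟩ := hS
  rw [mset_cast]
  refine ⟨by simpa using hlen, ?_⟩
  intro row hmem
  rcases List.mem_or_eq_of_mem_set hmem with h | h
  · exact hrow _ h
  · subst h
    rw [List.length_set]
    have hmem' : dp.getD a [] ∈ dp := by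
      rw [List.getD_eq_getElem dp [] (by omega)]
      exact List.getElem_mem _
    exact hrow _ hmem' 

lemma mget_mset {n : Nat} {dp : List (List (Option Int))} (hS : Shape n dp)
    (a b : Nat) (ha : a < n) (hb : b < n) (v : Option Int) (a' b' : Nat) :
    mget (mset dp (a : Int) (b : Int) v) (a' : Int) (b' : Int)
      = if a' = a ∧ b' = b then v else mget dp (a' : Int) (b' : Int) := by
  obtain ⟨hlen, hrow⟩ := hS
  have hrl : (dp.getD a []).length = n := by
    rw [List.getD_eq_getElem (hn := by omega)]
    exact hrow _ (List.getElem_mem _)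
  rw [mset_cast, mget_cast, mget_cast, getD_set_nat]
  by_cases h1 : a' = a
  · subst h1
    rw [if_pos ⟨rfl, by omega⟩, getD_set_nat]
    by_cases h2 : b' = b
    · rw [if_pos ⟨h2, by omega⟩, if_pos ⟨rfl, h2⟩]
    · rw [if_neg (by omega), if_neg (by omega)]
  · rw [if_neg (by omega), if_neg (by omega)]

lemma M_congr (W : List Int) (l r l' r' a b : Nat)
    (h1 : (1 ≤ a ∧ a ≤ b ∧ b + 1 ≤ W.length ∧ (a - 1 < l ∨ (a - 1 = l ∧ r ≤ b)))
        ↔ (1 ≤ a ∧ a ≤ b ∧ b + 1 ≤ W.length ∧ (a - 1 < l' ∨ (a - 1 = l' ∧ r' ≤ b))))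
    (h2 : (a ≤ b ∧ b + 2 ≤ W.length ∧ (a < l ∨ (a = l ∧ r ≤ b + 1)))
        ↔ (a ≤ b ∧ b + 2 ≤ W.length ∧ (a < l' ∨ (a = l' ∧ r' ≤ b + 1)))) :
    M W l r a b = M W l' r' a b := by
  unfold M
  rw [if_congr h1 rfl rfl, if_congr h2 rfl rfl]

-- a cell all of whose pushes are done holds some (G a b)
lemma M_ready (W : List Int) (l r a b : Nat) (hab : a ≤ b) (hb : b < W.length)
    (h1 : 1 ≤ a → (a - 1 < l ∨ (a - 1 = l ∧ r ≤ b)))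
    (h2 : b + 2 ≤ W.length → (a < l ∨ (a = l ∧ r ≤ b + 1))) :
    M W l r a b = some (G W a b) := by
  unfold M
  by_cases ha : a = 0
  · subst ha
    by_cases hbn : b + 1 = W.length
    · rw [if_pos ⟨rfl, hbn⟩, if_neg (by omega), if_neg (by omega)]
      conv_rhs => rw [G]
      simp [hbn, omax]
    · have hlt : b + 1 < W.length := by omega
      rw [if_neg (by omega), if_neg (by omega), if_pos ⟨hab, by omega, h2 (by omega)⟩]
      conv_rhs => rw [G]
      simp only [if_neg hbn, dif_pos hlt]
      rfl
  · have h1' := h1 (by omega)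
    rw [if_neg (by omega), if_pos ⟨by omega, hab, by omega, h1'⟩]
    by_cases hbn : b + 2 ≤ W.length
    · rw [if_pos ⟨hab, hbn, h2 hbn⟩]
      conv_rhs => rw [G]
      simp only [dif_neg ha, dif_pos (show b + 1 < W.length by omega)]
      rfl
    · rw [if_neg (by omega)]
      conv_rhs => rw [G]
      simp only [dif_neg ha, dif_neg (show ¬ b + 1 < W.length by omega)]
      rfl

-- the initial table satisfies the invariant for the empty done-set
lemma init_inv (W : List Int) (hW : W ≠ []) :
    Shape W.length (mset (List.replicate W.length (List.replicate W.length (none : Option Int))) 0 ((W.length : Int) - 1) (some 0))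
    ∧ DPInv W 0 W.length (mset (List.replicate W.length (List.replicate W.length (none : Option Int))) 0 ((W.length : Int) - 1) (some 0)) := by
  have hn : 1 ≤ W.length := List.length_pos_iff.mpr hW
  have hc0 : (0 : Int) = ((0 : Nat) : Int) := by norm_num
  have hc1 : (W.length : Int) - 1 = ((W.length - 1 : Nat) : Int) := by omega
  have hS0 : Shape W.length (List.replicate W.length (List.replicate W.length (none : Option Int))) := by
    constructor
    · simp
    · intro row hmem
      rw [List.eq_of_mem_replicate hmem]
      simp
  rw [hc0, hc1]
  refine ⟨shape_mset hS0 0 (W.length - 1) (by omega) _, ?_⟩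
  intro a b hab hb
  rw [mget_mset hS0 0 (W.length - 1) (by omega) (by omega)]
  have hrep : mget (List.replicate W.length (List.replicate W.length (none : Option Int))) (a : Int) (b : Int) = none := by
    rw [mget_cast]
    simp only [List.getD_eq_getElem?_getD, List.getElem?_replicate]
    simp [show a < W.length by omega, hb]
  unfold M
  rw [if_neg (show ¬ (1 ≤ a ∧ a ≤ b ∧ b + 1 ≤ W.length ∧ (a - 1 < 0 ∨ (a - 1 = 0 ∧ W.length ≤ b))) by omega),
      if_neg (show ¬ (a ≤ b ∧ b + 2 ≤ W.length ∧ (a < 0 ∨ (a = 0 ∧ W.length ≤ b + 1))) by omega)]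
  by_cases h : a = 0 ∧ b = W.length - 1
  · rw [if_pos h, if_pos (by omega)]
    rfl
  · rw [if_neg h, hrep, if_neg (by omega)]
    rfl

-- one inner-loop step preserves the invariant, moving the done-boundary from r+1 to r
lemma stepA_inv (W : List Int) (l r : Nat) (hlr : l < r) (hr : r < W.length)
    (dp : List (List (Option Int))) (hS : Shape W.length dp) (hI : DPInv W l (r+1) dp) :
    Shape W.length (stepA W (l : Int) dp (r : Int)) ∧ DPInv W l r (stepA W (l : Int) dp (r : Int)) := by
  have hc1 : (l : Int) + 1 = ((l + 1 : Nat) : Int) := by omega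
  have hc2 : (r : Int) - 1 = ((r - 1 : Nat) : Int) := by omega
  have hwl : PySem.List.pyGetD W (l : Int) 0 = wAt W l := by simp [wAt]
  have hwr : PySem.List.pyGetD W (r : Int) 0 = wAt W r := by simp [wAt]
  have hyear : (l : Int) + ((W.length : Int) - (r : Int)) = yr W.length l r := rfl
  have hread : mget dp (l : Int) (r : Int) = some (G W l r) := by
    rw [hI l r (by omega) hr]
    exact M_ready W l (r+1) l r (by omega) hr (by omega) (by omega)
  have hreadA : mget dp ((l + 1 : Nat) : Int) ((r : Nat) : Int) = none := by
    rw [hI (l+1) r (by omega) hr]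
    unfold M
    rw [if_neg (by omega), if_neg (by omega), if_neg (by omega)]
    rfl
  unfold stepA
  dsimp only
  rw [hc1, hc2, hwl, hwr, hyear, hread, hreadA]
  set vA : Option Int := omax (oadd (some (G W l r)) (yr W.length l r * wAt W l)) none with hvA
  have hvA' : vA = some (G W l r + yr W.length l r * wAt W l) := rfl
  set dpA := mset dp ((l + 1 : Nat) : Int) ((r : Nat) : Int) vA with hdpA
  have hSA : Shape W.length dpA := shape_mset hS (l+1) r (by omega) vA
  have hgetA : ∀ a b : Nat, mget dpA (a : Int) (b : Int)
      = if a = l + 1 ∧ b = r then vA else mget dp (a : Int) (b : Int) := by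
    intro a b
    rw [hdpA, mget_mset hS (l+1) r (by omega) hr vA a b]
  have hreadA2 : mget dpA (l : Int) (r : Int) = some (G W l r) := by
    rw [hgetA l r, if_neg (by omega), hread]
  have hreadB : mget dpA (l : Int) ((r - 1 : Nat) : Int) = M W l (r+1) l (r-1) := by
    rw [hgetA l (r-1), if_neg (by omega)]
    exact hI l (r-1) (by omega) (by omega)
  rw [hreadA2, hreadB]
  set vB : Option Int := omax (oadd (some (G W l r)) (yr W.length l r * wAt W r)) (M W l (r+1) l (r-1)) with hvB
  set dpB := mset dpA (l : Int) ((r - 1 : Nat) : Int) vB with hdpB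
  refine ⟨shape_mset hSA l (r-1) (by omega) vB, ?_⟩
  intro a b hab hb
  rw [hdpB, mget_mset hSA l (r-1) (by omega) (by omega) vB a b]
  by_cases hB : a = l ∧ b = r - 1
  · obtain ⟨ha', hb'⟩ := hB
    rw [if_pos ⟨ha', hb'⟩, hvB, ha', hb']
    -- M W l r l (r-1) = omax (some (G l r + yr l r * w r)) (M W l (r+1) l (r-1))
    unfold M
    rw [if_neg (show ¬ (l = 0 ∧ r - 1 + 1 = W.length) by omega)]
    have hiff : (1 ≤ l ∧ l ≤ r - 1 ∧ r - 1 + 1 ≤ W.length ∧ (l - 1 < l ∨ (l - 1 = l ∧ r + 1 ≤ r - 1)))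
        ↔ (1 ≤ l ∧ l ≤ r - 1 ∧ r - 1 + 1 ≤ W.length ∧ (l - 1 < l ∨ (l - 1 = l ∧ r ≤ r - 1))) := by omega
    rw [if_congr hiff rfl rfl,
        if_neg (show ¬ (l ≤ r - 1 ∧ r - 1 + 2 ≤ W.length ∧ (l < l ∨ (l = l ∧ r + 1 ≤ r - 1 + 1))) by omega),
        if_pos (show l ≤ r - 1 ∧ r - 1 + 2 ≤ W.length ∧ (l < l ∨ (l = l ∧ r ≤ r - 1 + 1)) by omega),
        show r - 1 + 1 = r by omega, omax_none_right, omax_comm]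
    rfl
  · rw [if_neg hB, hgetA a b]
    by_cases hA : a = l + 1 ∧ b = r
    · obtain ⟨ha', hb'⟩ := hA
      rw [if_pos ⟨ha', hb'⟩, hvA', ha', hb']
      -- M W l r (l+1) r = some (G l r + yr l r * w l)
      unfold M
      rw [if_neg (by omega),
          if_pos (show 1 ≤ l + 1 ∧ l + 1 ≤ r ∧ r + 1 ≤ W.length ∧ (l + 1 - 1 < l ∨ (l + 1 - 1 = l ∧ r ≤ r)) by omega),
          if_neg (show ¬ (l + 1 ≤ r ∧ r + 2 ≤ W.length ∧ (l + 1 < l ∨ (l + 1 = l ∧ r ≤ r + 1))) by omega)]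
      have : l + 1 - 1 = l := by omega
      rw [this]
      rfl
    · rw [if_neg hA, hI a b hab hb]
      exact M_congr W l (r+1) l r a b (by omega) (by omega)

-- the whole outer loop of A, with the loop indices as Nats
def outerFold (W : List Int) (L : Nat) : List (List (Option Int)) :=
  (List.range L).foldl
    (fun dp (k : Nat) => (PySem.List.pyRange ((W.length : Int) - 1) (k : Int) (-1)).foldl (stepA W (k : Int)) dp)
    (mset (List.replicate W.length (List.replicate W.length (none : Option Int))) 0 ((W.length : Int) - 1) (some 0))

lemma inner_inv (W : List Int) (l : Nat) (hl : l < W.length)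
    (dp0 : List (List (Option Int))) (hS0 : Shape W.length dp0) (hI0 : DPInv W l W.length dp0) :
    ∀ m, m ≤ W.length - 1 - l →
      Shape W.length ((List.range m).foldl (fun dp (k : Nat) => stepA W (l : Int) dp ((W.length : Int) - 1 - (k : Int))) dp0)
      ∧ DPInv W l (W.length - m) ((List.range m).foldl (fun dp (k : Nat) => stepA W (l : Int) dp ((W.length : Int) - 1 - (k : Int))) dp0) := by
  intro m
  induction m with
  | zero => intro _; simpa using ⟨hS0, hI0⟩
  | succ m ih =>
    intro hm
    obtain ⟨hS, hI⟩ := ih (by omega)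
    rw [List.range_succ, List.foldl_append, List.foldl_cons, List.foldl_nil]
    have hcast : (W.length : Int) - 1 - (m : Int) = ((W.length - 1 - m : Nat) : Int) := by omega
    rw [hcast]
    have heq : W.length - m = (W.length - 1 - m) + 1 := by omega
    rw [heq] at hI
    obtain ⟨hS', hI'⟩ := stepA_inv W l (W.length - 1 - m) (by omega) (by omega) _ hS hI
    refine ⟨hS', ?_⟩
    have : W.length - (m + 1) = W.length - 1 - m := by omega
    rw [this]
    exact hI'

lemma outer_shift (W : List Int) (L : Nat) (hL : L < W.length)
    (dp : List (List (Option Int))) (hI : DPInv W L (W.length - (W.length - 1 - L)) dp) :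
    DPInv W (L + 1) W.length dp := by
  intro a b hab hb
  rw [hI a b hab hb]
  exact M_congr W L (W.length - (W.length - 1 - L)) (L + 1) W.length a b (by omega) (by omega)

lemma outer_inv (W : List Int) (hW : W ≠ []) :
    ∀ L, L ≤ W.length → Shape W.length (outerFold W L) ∧ DPInv W L W.length (outerFold W L) := by
  intro L
  induction L with
  | zero =>
    intro _
    unfold outerFold
    simpa using init_inv W hW
  | succ L ih =>
    intro hL
    obtain ⟨hS, hI⟩ := ih (by omega)
    unfold outerFold
    rw [List.range_succ, List.foldl_append, List.foldl_cons, List.foldl_nil]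
    rw [PySem.List.pyRange_neg_one, List.foldl_map]
    have hcast : (((W.length : Int) - 1) - (L : Int)).toNat = W.length - 1 - L := by omega
    rw [hcast]
    obtain ⟨hS', hI'⟩ := inner_inv W L (by omega) (outerFold W L) hS hI (W.length - 1 - L) le_rfl
    exact ⟨hS', outer_shift W L (by omega) _ hI'⟩

-- the value A returns, phrased through G
lemma A_char (W : List Int) (hW : W ≠ []) :
    sellWinesTopDown W
      = (List.range W.length).foldl (fun m i => max m (G W i i + (W.length : Int) * wAt W i)) 0 := by
  obtain ⟨hS2, hI2⟩ := outer_inv W hW W.length le_rfl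
  unfold sellWinesTopDown
  dsimp only
  rw [PySem.List.pyRange_zero_natCast]
  simp only [List.foldl_map]
  refine PySem.List.foldl_congr_mem _ _ _ _ ?_
  intro acc i hi
  have hi' : i < W.length := List.mem_range.mp hi
  have hcell : mget (outerFold W W.length) (i : Int) (i : Int) = some (G W i i) := by
    rw [hI2 i i le_rfl hi']
    exact M_ready W W.length W.length i i le_rfl hi' (by omega) (by omega)
  have : (List.range W.length).foldl
      (fun dp (k : Nat) => (PySem.List.pyRange ((W.length : Int) - 1) (k : Int) (-1)).foldl (stepA W (k : Int)) dp)
      (mset (List.replicate W.length (List.replicate W.length (none : Option Int))) 0 ((W.length : Int) - 1) (some 0))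
      = outerFold W W.length := rfl
  rw [this, hcell]
  simp [wAt]

-- ---- B side: altRec characterised at Nat points, and the exchange argument ----

def Fn (W : List Int) (l r : Nat) : Int := altRec W (l : Int) (r : Int)

lemma altRec_base (W : List Int) (l r : Int) (h : r < l) : altRec W l r = 0 := by
  rw [altRec, if_pos h]

lemma Fn_diag (W : List Int) (l : Nat) (_hl : l < W.length) : Fn W l l = (W.length : Int) * wAt W l := by
  unfold Fn
  rw [altRec, if_neg (by omega : ¬ (l : Int) > (l : Int))]
  dsimp only
  rw [altRec_base W _ _ (by omega), altRec_base W _ _ (by omega)]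
  simp [wAt]

lemma Fn_rec (W : List Int) (l r : Nat) (hlr : l < r) (_hr : r < W.length) :
    Fn W l r = max (yr W.length l r * wAt W l + Fn W (l+1) r)
               (yr W.length l r * wAt W r + Fn W l (r-1)) := by
  unfold Fn
  rw [altRec, if_neg (by omega : ¬ (l : Int) > (r : Int))]
  dsimp only
  have h3 : (W.length : Int) - ((r : Int) - (l : Int)) = yr W.length l r := by unfold yr; ring
  have h1 : (l : Int) + 1 = ((l + 1 : Nat) : Int) := by omega
  have h2 : (r : Int) - 1 = ((r - 1 : Nat) : Int) := by omega
  rw [h3, h1, h2]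
  simp [wAt]

lemma G_le_push1 (W : List Int) (a b : Nat) (h1 : 1 ≤ a) (_hab : a ≤ b) (_hb : b < W.length) :
    G W (a-1) b + yr W.length (a-1) b * wAt W (a-1) ≤ G W a b := by
  conv_rhs => rw [G]
  rw [dif_neg (by omega : ¬ a = 0)]
  by_cases hb2 : b + 1 < W.length
  · rw [dif_pos hb2]
    exact le_max_left _ _
  · rw [dif_neg hb2]

lemma G_le_push2 (W : List Int) (a b : Nat) (hab : a ≤ b) (hb2 : b + 2 ≤ W.length) :
    G W a (b+1) + yr W.length a (b+1) * wAt W (b+1) ≤ G W a b := by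
  by_cases ha : a = 0
  · subst ha
    conv_rhs => rw [G]
    rw [dif_pos rfl, if_neg (by omega), dif_pos (by omega)]
  · conv_rhs => rw [G]
    rw [dif_neg ha, dif_pos (by omega : b + 1 < W.length)]
    exact le_max_right _ _

lemma G_cases (W : List Int) (a b : Nat) (hab : a ≤ b) (hb : b < W.length)
    (hnb : ¬ (a = 0 ∧ b + 1 = W.length)) :
    (1 ≤ a ∧ G W a b = G W (a-1) b + yr W.length (a-1) b * wAt W (a-1)) ∨
    (b + 2 ≤ W.length ∧ G W a b = G W a (b+1) + yr W.length a (b+1) * wAt W (b+1)) := by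
  by_cases ha : a = 0
  · subst ha
    right
    refine ⟨by omega, ?_⟩
    conv_lhs => rw [G]
    rw [dif_pos rfl, if_neg (by omega), dif_pos (by omega)]
  · have h1 : 1 ≤ a := by omega
    by_cases hb2 : b + 1 < W.length
    · have hmax : G W a b = max (G W (a-1) b + yr W.length (a-1) b * wAt W (a-1))
          (G W a (b+1) + yr W.length a (b+1) * wAt W (b+1)) := by
        conv_lhs => rw [G]
        rw [dif_neg ha, dif_pos hb2]
      cases max_choice (G W (a-1) b + yr W.length (a-1) b * wAt W (a-1))
          (G W a (b+1) + yr W.length a (b+1) * wAt W (b+1)) with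
      | inl h => exact Or.inl ⟨h1, hmax.trans h⟩
      | inr h => exact Or.inr ⟨by omega, hmax.trans h⟩
    · left
      refine ⟨h1, ?_⟩
      conv_lhs => rw [G]
      rw [dif_neg ha, dif_neg hb2]

-- past + future value of the states on diagonal d (i left sales, state (i, n-1-d+i))
def Td (W : List Int) (d i : Nat) : Int :=
  G W i (W.length - 1 - d + i) + Fn W i (W.length - 1 - d + i)

def DM (W : List Int) (d : Nat) : Int := (Finset.range (d+1)).sup' (by simp) (Td W d)

lemma DM_step (W : List Int) (d : Nat) (hd : d + 1 ≤ W.length - 1) : DM W (d+1) = DM W d := by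
  have hn : d + 2 ≤ W.length := by omega
  apply le_antisymm
  · apply Finset.sup'_le
    intro i hi
    have hi' : i ≤ d + 1 := by have := Finset.mem_range.mp hi; omega
    set r := W.length - 1 - (d+1) + i with hrdef
    have hTd : Td W (d+1) i = G W i r + Fn W i r := rfl
    have hr : r < W.length := by omega
    have hir : i ≤ r := by omega
    have hnb : ¬ (i = 0 ∧ r + 1 = W.length) := by omega
    rcases G_cases W i r hir hr hnb with ⟨h1, he⟩ | ⟨h2, he⟩
    · have hstep : yr W.length (i-1) r * wAt W (i-1) + Fn W i r ≤ Fn W (i-1) r := by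
        rw [Fn_rec W (i-1) r (by omega) hr, show i - 1 + 1 = i by omega]
        exact le_max_left _ _
      have hT : Td W d (i-1) = G W (i-1) r + Fn W (i-1) r := by
        unfold Td
        rw [show W.length - 1 - d + (i-1) = r by omega]
      calc Td W (d+1) i = G W (i-1) r + yr W.length (i-1) r * wAt W (i-1) + Fn W i r := by
            rw [hTd, he]
        _ ≤ G W (i-1) r + Fn W (i-1) r := by linarith
        _ = Td W d (i-1) := hT.symm
        _ ≤ DM W d := Finset.le_sup' _ (Finset.mem_range.mpr (by omega))
    · have hid : i ≤ d := by omega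
      have hstep : yr W.length i (r+1) * wAt W (r+1) + Fn W i r ≤ Fn W i (r+1) := by
        rw [Fn_rec W i (r+1) (by omega) (by omega), show r + 1 - 1 = r by omega]
        exact le_max_right _ _
      have hT : Td W d i = G W i (r+1) + Fn W i (r+1) := by
        unfold Td
        rw [show W.length - 1 - d + i = r + 1 by omega]
      calc Td W (d+1) i = G W i (r+1) + yr W.length i (r+1) * wAt W (r+1) + Fn W i r := by
            rw [hTd, he]
        _ ≤ G W i (r+1) + Fn W i (r+1) := by linarith
        _ = Td W d i := hT.symm
        _ ≤ DM W d := Finset.le_sup' _ (Finset.mem_range.mpr (by omega))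
  · apply Finset.sup'_le
    intro i hi
    have hi' : i ≤ d := by have := Finset.mem_range.mp hi; omega
    set r := W.length - 1 - d + i with hrdef
    have hir : i < r := by omega
    have hr : r < W.length := by omega
    have hTd : Td W d i = G W i r + Fn W i r := rfl
    rw [hTd, Fn_rec W i r hir hr, ← max_add_add_left]
    apply max_le
    · have hg : G W i r + yr W.length i r * wAt W i ≤ G W (i+1) r := by
        have h := G_le_push1 W (i+1) r (by omega) (by omega) hr
        simpa using h
      have hT : Td W (d+1) (i+1) = G W (i+1) r + Fn W (i+1) r := by
        unfold Td
        rw [show W.length - 1 - (d+1) + (i+1) = r by omega]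
      calc G W i r + (yr W.length i r * wAt W i + Fn W (i+1) r)
          ≤ G W (i+1) r + Fn W (i+1) r := by linarith
        _ = Td W (d+1) (i+1) := hT.symm
        _ ≤ DM W (d+1) := Finset.le_sup' _ (Finset.mem_range.mpr (by omega))
    · have hg : G W i r + yr W.length i r * wAt W r ≤ G W i (r-1) := by
        have h := G_le_push2 W i (r-1) (by omega) (by omega)
        rw [show r - 1 + 1 = r by omega] at h
        exact h
      have hT : Td W (d+1) i = G W i (r-1) + Fn W i (r-1) := by
        unfold Td
        rw [show W.length - 1 - (d+1) + i = r - 1 by omega]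
      calc G W i r + (yr W.length i r * wAt W r + Fn W i (r-1))
          ≤ G W i (r-1) + Fn W i (r-1) := by linarith
        _ = Td W (d+1) i := hT.symm
        _ ≤ DM W (d+1) := Finset.le_sup' _ (Finset.mem_range.mpr (by omega))

lemma DM_const (W : List Int) : ∀ d, d ≤ W.length - 1 → DM W d = DM W 0 := by
  intro d
  induction d with
  | zero => intro _; rfl
  | succ d ih => intro hd; rw [DM_step W d hd, ih (by omega)]

lemma DM_zero (W : List Int) (hW : W ≠ []) : DM W 0 = Fn W 0 (W.length - 1) := by
  have h00 : DM W 0 = Td W 0 0 := by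
    apply le_antisymm
    · apply Finset.sup'_le
      intro i hi
      have : i = 0 := by have := Finset.mem_range.mp hi; omega
      rw [this]
    · exact Finset.le_sup' _ (by simp)
  rw [h00]
  unfold Td
  rw [show W.length - 1 - 0 + 0 = W.length - 1 by omega]
  have hn : 1 ≤ W.length := List.length_pos_iff.mpr hW
  have hG : G W 0 (W.length - 1) = 0 := by
    rw [G, dif_pos rfl, if_pos (by omega)]
  rw [hG, zero_add]

lemma sup'_range_succ (f : Nat → Int) (n : Nat) :
    (Finset.range (n+2)).sup' (by simp) f
      = max ((Finset.range (n+1)).sup' (by simp) f) (f (n+1)) := by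
  apply le_antisymm
  · apply Finset.sup'_le
    intro i hi
    have hi' : i < n + 2 := Finset.mem_range.mp hi
    by_cases h : i = n + 1
    · rw [h]; exact le_max_right _ _
    · exact le_trans (Finset.le_sup' f (Finset.mem_range.mpr (by omega))) (le_max_left _ _)
  · apply max_le
    · apply Finset.sup'_le
      intro i hi
      have := Finset.mem_range.mp hi
      exact Finset.le_sup' f (Finset.mem_range.mpr (by omega))
    · exact Finset.le_sup' f (Finset.mem_range.mpr (by omega))

lemma foldl_max_eq (f : Nat → Int) : ∀ n : Nat, ∀ c : Int,
    (List.range (n+1)).foldl (fun m i => max m (f i)) c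
      = max c ((Finset.range (n+1)).sup' (by simp) f) := by
  intro n
  induction n with
  | zero =>
    intro c
    have hS : (Finset.range (0+1)).sup' (by simp) f = f 0 := by
      apply le_antisymm
      · apply Finset.sup'_le
        intro i hi
        have : i = 0 := by have := Finset.mem_range.mp hi; omega
        rw [this]
      · exact Finset.le_sup' _ (by simp)
    rw [hS]
    simp [List.range_one]
  | succ n ih =>
    intro c
    rw [List.range_succ, List.foldl_append, List.foldl_cons, List.foldl_nil, ih]
    rw [sup'_range_succ f n, max_assoc]

theorem main_equiv (wines : List Int) (h : wines ≠ []) : sellWinesTopDown wines = sellWinesTopDown_alt wines := by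
  have hn : 1 ≤ wines.length := List.length_pos_iff.mpr h
  obtain ⟨N, hN⟩ : ∃ N, wines.length = N + 1 := ⟨wines.length - 1, by omega⟩
  rw [A_char wines h]
  have hbody : ∀ (acc : Int), ∀ i ∈ List.range wines.length,
      (fun m i => max m (G wines i i + (wines.length : Int) * wAt wines i)) acc i
        = (fun m i => max m (Td wines (wines.length - 1) i)) acc i := by
    intro acc i hi
    have hi' : i < wines.length := List.mem_range.mp hi
    have hT : Td wines (wines.length - 1) i = G wines i i + (wines.length : Int) * wAt wines i := by
      unfold Td
      rw [show wines.length - 1 - (wines.length - 1) + i = i by omega, Fn_diag wines i hi']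
    dsimp only
    rw [hT]
  rw [PySem.List.foldl_congr_mem _ _ _ _ hbody]
  unfold sellWinesTopDown_alt
  rw [hN, show N + 1 - 1 = N by omega]
  rw [foldl_max_eq (Td wines N) N 0]
  have hDM : (Finset.range (N+1)).sup' (by simp) (Td wines N) = DM wines N := rfl
  rw [hDM, DM_const wines N (by omega), DM_zero wines h]
  unfold Fn
  rw [hN, show N + 1 - 1 = N by omega]
  rw [show ((N + 1 : Nat) : Int) - 1 = ((N : Nat) : Int) by omega]
  norm_num

-- ===== VERDICT (by name: the statement is the Claim_ definition above) =====
theorem sellWinesTopDown_spec : Claim_equal_sellWinesTopDown := by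
  intro wines _ hpre
  unfold Spec_sellWinesTopDown
  exact main_equiv wines hpre
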